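-- pv_equiv track=rewrite | github.com/degrado-lab/ligand-vdGs | ligand_vdgs/functions/align_and_cluster.py | permute_AA_duplicates
-- ===== SOURCE A (Python) =====
-- from itertools import permutations, combinations, product
--
-- def permute_AA_duplicates(seq):
--     # Dictionary to store indices for each element in the sequence
--     seen = {}
--     for i, item in enumerate(seq):
--         if item not in seen:
--             seen[item] = []
--         seen[item].append(i)
--
--     permute_groups = [] # list of all index groups that have duplicates
--     for indices in seen.values():
--         if len(indices) > 1:  # only interested in elements with duplicates
--             permute_groups.append(indices)
--
--     if not permute_groups: # no duplicates, so return the original index list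
--         return [list(range(len(seq)))]
--
--     # generate all possible permutations of indices within each group of duplicates
--     permuted_idx_lists = []
--     for perm_combination in product(*[permutations(group) for group in
--                                       permute_groups]):
--         # start with the list of original indices
--         permuted_idx = list(range(len(seq)))
--
--         # flatten the product of permutations and assign them to the corresponding
--         # positions
--         for group_idx, perm in zip(permute_groups, perm_combination):
--             for orig_idx, new_idx in zip(group_idx, perm):
--                 permuted_idx[orig_idx] = new_idx
--
--         permuted_idx_lists.append(permuted_idx)
--
--     return permuted_idx_lists
-- ===== SOURCE B (Python) =====
-- def permute_AA_duplicates(seq):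
--     # Group indices by element, keep groups with duplicates.
--     seen = {}
--     for i, item in enumerate(seq):
--         seen.setdefault(item, []).append(i)
--     groups = [g for g in seen.values() if len(g) > 1]
--
--     # Instead of enumerating itertools.product of itertools.permutations, count
--     # through a mixed-radix odometer (one factorial-sized digit per group,
--     # rightmost fastest) and UNRANK each digit into the corresponding
--     # permutation of its group via the factorial number system (Lehmer code).
--     def fact(n):
--         f = 1
--         for i in range(2, n + 1):
--             f *= i
--         return f
--
--     radices = [fact(len(g)) for g in groups]
--     total = 1
--     for rad in radices:
--         total *= rad
--
--     out = []
--     for k in range(total):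
--         # split k into one code per group, rightmost group varies fastest
--         codes = []
--         rem = k
--         for rad in reversed(radices):
--             rem, c = divmod(rem, rad)
--             codes.append(c)
--         codes.reverse()
--         r = list(range(len(seq)))
--         for g, c in zip(groups, codes):
--             # write the c-th permutation (lexicographic by position) of the
--             # group's indices into r at the group's positions
--             avail = list(g)
--             m = c
--             for pos in g:
--                 f = fact(len(avail) - 1)
--                 idx, m = divmod(m, f)
--                 r[pos] = avail.pop(idx)
--         out.append(r)
--     return out
-- ===== Notes on version B (the rewrite author's own statement) =====
-- stated objective: alternative
-- what changed: Replaces the explicit enumeration via itertools.product of itertools.permutations with arithmetic ranking: B counts k through a mixed-radix odometer of factorial digits (one per duplicate group, rightmost fastest) and unranks each digit into the group's k-th permutation via the factorial number system (Lehmer code), so no permutation lists are ever materialised.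
import Mathlib
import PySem

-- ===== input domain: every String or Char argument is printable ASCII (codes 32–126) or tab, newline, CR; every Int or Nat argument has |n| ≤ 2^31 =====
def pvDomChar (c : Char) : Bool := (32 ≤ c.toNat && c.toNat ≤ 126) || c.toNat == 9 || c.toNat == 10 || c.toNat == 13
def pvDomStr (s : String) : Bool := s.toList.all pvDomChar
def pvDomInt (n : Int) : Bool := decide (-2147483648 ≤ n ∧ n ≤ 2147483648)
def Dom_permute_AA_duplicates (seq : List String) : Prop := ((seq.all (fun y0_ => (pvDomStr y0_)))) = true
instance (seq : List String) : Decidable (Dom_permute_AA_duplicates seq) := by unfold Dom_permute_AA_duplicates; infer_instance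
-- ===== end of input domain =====

-- B replaces the itertools.product-of-permutations enumeration by a mixed-radix
-- odometer of factorial digits, unranking each digit into its group's permutation
-- via the factorial number system (alternative algorithm, same cost).


-- ===== PORT A =====
-- shared with port B: both Pythons build the same grouping dict ('seen') and the
-- same filtered list of duplicate-index groups.
def buildGroups (seq : List String) : List (List Int) :=
  let seen : PySem.Dict String (List Int) :=
    (PySem.List.enumerate seq 0).foldl
      (fun d p => d.modify p.2 [] (· ++ [p.1])) PySem.Dict.empty
  seen.values.filter (fun g => 1 < g.length)

-- A's inner loop 'for orig, new in zip(group, perm): r[orig] = new'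
def applyGroup (r : List Int) (g p : List Int) : List Int :=
  (g.zip p).foldl (fun r' on => PySem.List.pySetD r' on.1 on.2) r

-- itertools.product(*lists): rightmost factor varies fastest
def pyProd : List (List (List Int)) → List (List (List Int))
  | [] => [[]]
  | xs :: xss => xs.flatMap (fun x => (pyProd xss).map (x :: ·))

def permute_AA_duplicates (seq : List String) : List (List Int) :=
  let groups := buildGroups seq
  if groups.isEmpty then [PySem.List.pyRange 0 (seq.length : Int) 1]
  else
    (pyProd (groups.map (fun g => PySem.List.permutations g g.length))).map
      (fun combo =>
        (groups.zip combo).foldl (fun r gp => applyGroup r gp.1 gp.2)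
          (PySem.List.pyRange 0 (seq.length : Int) 1))

-- ===== PORT B =====
-- Source B's 'fact': f = 1; for i in range(2, n+1): f *= i
def factB (n : Int) : Int := (PySem.List.pyRange 2 (n + 1) 1).foldl (· * ·) 1

-- Source B's unranking loop: for pos in g: f = fact(len(avail)-1); idx, m = divmod(m, f); r[pos] = avail.pop(idx)
def unrankInto (r : List Int) (gpos avail : List Int) (m : Int) : List Int :=
  match gpos with
  | [] => r
  | o :: rest =>
    let f := factB (PySem.List.len avail - 1)
    let idx := PySem.Int.floordiv m f
    let m' := PySem.Int.mod m f
    match PySem.List.pop? avail idx with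
    | none => r  -- unreachable: idx is always in range
    | some va => unrankInto (PySem.List.pySetD r o va.1) rest va.2 m'

def permute_AA_duplicates_alt (seq : List String) : List (List Int) :=
  let groups := buildGroups seq
  let radices := groups.map (fun g => factB (PySem.List.len g))
  let total := radices.foldl (· * ·) 1
  (PySem.List.pyRange 0 total 1).foldl
    (fun out k =>
      -- codes = []; rem = k; for rad in reversed(radices): rem, c = divmod(rem, rad); codes.append(c); codes.reverse()
      let codes :=
        (radices.reverse.foldl
          (fun st rad => (PySem.Int.floordiv st.1 rad, st.2 ++ [PySem.Int.mod st.1 rad]))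
          (k, ([] : List Int))).2.reverse
      let r := (groups.zip codes).foldl
        (fun r' gc => unrankInto r' gc.1 gc.1 gc.2)
        (PySem.List.pyRange 0 (seq.length : Int) 1)
      out ++ [r])
    []

-- ===== PRECONDITION & SPEC =====
def Spec_permute_AA_duplicates (seq : List String) (out : List (List Int)) : Prop := out = permute_AA_duplicates_alt seq
instance (seq : List String) (out : List (List Int)) : Decidable (Spec_permute_AA_duplicates seq out) := by unfold Spec_permute_AA_duplicates; infer_instance

-- ===== CLAIM (what is proved, stated in full; the proofs are below) =====
def Claim_equal_permute_AA_duplicates : Prop := ∀ (seq : List String), Dom_permute_AA_duplicates seq → Spec_permute_AA_duplicates seq (permute_AA_duplicates seq)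

-- ===== LEMMAS AND PROOFS =====

-- proof-side abbreviations
def prodFact (gs : List (List Int)) : Nat := (gs.map (fun g => Nat.factorial g.length)).prod

-- the mixed-radix digits of k, slowest group first (what Source B's reversed codes list holds)
def codesAux (gs : List (List Int)) (k : Nat) : List Int :=
  match gs with
  | [] => []
  | g :: rest => ((k / prodFact rest % Nat.factorial g.length : Nat) : Int) :: codesAux rest k

theorem prodFact_pos (gs : List (List Int)) : 0 < prodFact gs := by
  induction gs with
  | nil => simp [prodFact]
  | cons g rest ih =>
      have h := Nat.mul_pos (Nat.factorial_pos g.length) ih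
      simpa [prodFact] using h

theorem factB_natCast (n : Nat) : factB (n : Int) = (Nat.factorial n : Int) := by
  induction n with
  | zero => simp [factB, PySem.List.pyRange_one_eq_nil]
  | succ m ih =>
      cases m with
      | zero => simp [factB, PySem.List.pyRange_one_eq_nil]
      | succ m' =>
          have h : ((m' + 1 + 1 : Nat) : Int) + 1 = (((m' + 1 : Nat) : Int) + 1) + 1 := by
            push_cast; ring
          rw [factB, h, PySem.List.pyRange_one_succ_right (by push_cast; omega),
            List.foldl_append]
          have ih' : (PySem.List.pyRange 2 (((m' + 1 : Nat) : Int) + 1) 1).foldl (· * ·) 1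
              = (Nat.factorial (m' + 1) : Int) := ih
          simp only [List.foldl_cons, List.foldl_nil, ih']
          have hf : Nat.factorial (m' + 1 + 1) = (m' + 1 + 1) * Nat.factorial (m' + 1) :=
            Nat.factorial_succ _
          rw [hf]; push_cast; ring

theorem range_mul_flatMap {α : Type} (a b : Nat) (f : Nat → α) :
    (List.range (a * b)).map f
      = (List.range a).flatMap (fun i => (List.range b).map (fun j => f (i * b + j))) := by
  induction a with
  | zero => simp
  | succ a ih =>
      rw [Nat.succ_mul, List.range_add, List.map_append, ih, List.range_succ,
        List.flatMap_append]
      simp [List.map_map, Function.comp_def]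

-- unranking the c-th Lehmer code equals taking the c-th permutation, at list level
theorem unrank_perms (n : Nat) (avail gpos r : List Int)
    (ha : avail.length = n) (hg : gpos.length = n) :
    (List.range (Nat.factorial n)).map (fun c : Nat => unrankInto r gpos avail (c : Int))
      = (PySem.List.permutations avail n).map (fun p => applyGroup r gpos p) := by
  induction n generalizing avail gpos r with
  | zero =>
      rcases List.length_eq_zero_iff.mp ha with rfl
      rcases List.length_eq_zero_iff.mp hg with rfl
      simp [PySem.List.permutations, unrankInto, applyGroup]
  | succ n ih =>
      rcases gpos with _ | ⟨o, gs⟩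
      · simp at hg
      have hgs : gs.length = n := by simpa using hg
      rw [Nat.factorial_succ, range_mul_flatMap]
      rw [PySem.List.permutations]
      rw [ha, List.map_flatMap]
      apply List.flatMap_congr
      intro i hi
      have hilt : i < n + 1 := List.mem_range.mp hi
      have hget : avail[i]? = some (avail[i]'(by omega)) :=
        List.getElem?_eq_getElem (by omega)
      rw [hget]
      have herase : (avail.eraseIdx i).length = n := by
        rw [List.length_eraseIdx_of_lt (by omega)]; omega
      rw [List.map_map]
      have happ : ((fun p => applyGroup r (o :: gs) p) ∘ ((avail[i]'(by omega)) :: ·))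
          = fun p => applyGroup (PySem.List.pySetD r o (avail[i]'(by omega))) gs p := by
        funext p; simp [applyGroup]
      rw [happ,
        ← ih (avail.eraseIdx i) gs (PySem.List.pySetD r o (avail[i]'(by omega))) herase hgs]
      apply List.map_congr_left
      intro j hj
      have hjlt : j < Nat.factorial n := List.mem_range.mp hj
      show unrankInto r (o :: gs) avail ((i * Nat.factorial n + j : Nat) : Int) = _
      rw [unrankInto]
      have hlen : PySem.List.len avail - 1 = ((n : Nat) : Int) := by
        simp [PySem.List.len_eq, ha]
      rw [hlen, factB_natCast]
      have hdivn : (i * Nat.factorial n + j) / Nat.factorial n = i := by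
        rw [Nat.add_comm, Nat.add_mul_div_right _ _ (Nat.factorial_pos n),
          Nat.div_eq_of_lt hjlt, Nat.zero_add]
      have hmodn : (i * Nat.factorial n + j) % Nat.factorial n = j := by
        rw [Nat.add_comm, Nat.add_mul_mod_self_right, Nat.mod_eq_of_lt hjlt]
      rw [PySem.Int.floordiv_natCast, PySem.Int.mod_natCast, hdivn, hmodn,
        PySem.List.pop?_natCast avail i (by omega)]

-- the digits of k are unchanged by adding a multiple of the radix product
theorem codesAux_add_mul (gs : List (List Int)) (i j : Nat) :
    codesAux gs (i * prodFact gs + j) = codesAux gs j := by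
  induction gs generalizing i with
  | nil => simp [codesAux]
  | cons g rest ih =>
      have hP : 0 < prodFact rest := prodFact_pos rest
      have hsplit : prodFact (g :: rest) = Nat.factorial g.length * prodFact rest := by
        simp [prodFact]
      rw [codesAux, codesAux, hsplit, ← Nat.mul_assoc]
      congr 1
      · congr 1
        rw [Nat.add_comm, Nat.add_mul_div_right _ _ hP, Nat.add_mul_mod_self_right]
      · exact ih (i * Nat.factorial g.length)

-- core: counting k through the odometer and unranking its digits enumerates
-- exactly product(*[permutations(g) for g in groups]) applied to r0
theorem odometer_eq_pyProd (groups : List (List Int)) (r0 : List Int) :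
    (List.range (prodFact groups)).map
      (fun k => (groups.zip (codesAux groups k)).foldl
        (fun r gc => unrankInto r gc.1 gc.1 gc.2) r0)
      = (pyProd (groups.map (fun g => PySem.List.permutations g g.length))).map
          (fun combo => (groups.zip combo).foldl
            (fun r gp => applyGroup r gp.1 gp.2) r0) := by
  induction groups generalizing r0 with
  | nil => simp [prodFact, codesAux, pyProd]
  | cons g gs ih =>
      have hsplit : prodFact (g :: gs) = Nat.factorial g.length * prodFact gs := by
        simp [prodFact]
      rw [hsplit, range_mul_flatMap]
      have hinner : ∀ i ∈ List.range (Nat.factorial g.length),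
          (List.range (prodFact gs)).map
            (fun j => ((g :: gs).zip (codesAux (g :: gs) (i * prodFact gs + j))).foldl
              (fun r gc => unrankInto r gc.1 gc.1 gc.2) r0)
          = (pyProd (gs.map (fun g' => PySem.List.permutations g' g'.length))).map
              (fun combo => (gs.zip combo).foldl
                (fun r gp => applyGroup r gp.1 gp.2)
                (unrankInto r0 g g ((i : Nat) : Int))) := by
        intro i hi
        have hilt : i < Nat.factorial g.length := List.mem_range.mp hi
        rw [← ih]
        apply List.map_congr_left
        intro j hj
        have hjlt : j < prodFact gs := List.mem_range.mp hj
        have hdig : codesAux (g :: gs) (i * prodFact gs + j)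
            = ((i : Nat) : Int) :: codesAux gs j := by
          rw [codesAux]
          congr 1
          · congr 1
            rw [Nat.add_comm, Nat.mul_comm, Nat.add_mul_div_left _ _ (prodFact_pos gs),
              Nat.div_eq_of_lt hjlt, Nat.zero_add, Nat.mod_eq_of_lt hilt]
          · rw [codesAux_add_mul]
        rw [hdig]
        simp
      rw [List.flatMap_congr hinner]
      rw [show pyProd ((g :: gs).map (fun g' => PySem.List.permutations g' g'.length))
          = (PySem.List.permutations g g.length).flatMap
              (fun p => (pyProd (gs.map (fun g' => PySem.List.permutations g' g'.length))).map
                (p :: ·)) from rfl]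
      rw [List.map_flatMap]
      have hswap : (List.range (Nat.factorial g.length)).flatMap
          (fun i => (pyProd (gs.map (fun g' => PySem.List.permutations g' g'.length))).map
            (fun combo => (gs.zip combo).foldl (fun r gp => applyGroup r gp.1 gp.2)
              (unrankInto r0 g g ((i : Nat) : Int))))
          = (((List.range (Nat.factorial g.length)).map
              (fun i : Nat => unrankInto r0 g g ((i : Nat) : Int))).flatMap
            (fun r' => (pyProd (gs.map (fun g' => PySem.List.permutations g' g'.length))).map
              (fun combo => (gs.zip combo).foldl (fun r gp => applyGroup r gp.1 gp.2) r'))) := by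
        rw [List.flatMap_map]
      rw [hswap, unrank_perms g.length g g r0 rfl rfl, List.flatMap_map]
      apply List.flatMap_congr
      intro p _
      rw [List.map_map]
      apply List.map_congr_left
      intro combo _
      simp [applyGroup]

-- B's radix product is the casted factorial product
theorem radices_foldl (gs : List (List Int)) (a : Int) :
    (gs.map (fun g => factB (PySem.List.len g))).foldl (· * ·) a
      = a * ((prodFact gs : Nat) : Int) := by
  induction gs generalizing a with
  | nil => simp [prodFact]
  | cons g rest ih =>
      simp only [List.map_cons, List.foldl_cons]
      rw [ih]
      simp only [PySem.List.len_eq, factB_natCast]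
      have : prodFact (g :: rest) = Nat.factorial g.length * prodFact rest := by
        simp [prodFact]
      rw [this]; push_cast; ring

-- Source B's divmod loop over reversed(radices) computes exactly the digits codesAux
theorem decode_foldl (gs : List (List Int)) (k : Nat) (acc : List Int) :
    ((gs.map (fun g => factB (PySem.List.len g))).reverse.foldl
        (fun st rad => (PySem.Int.floordiv st.1 rad, st.2 ++ [PySem.Int.mod st.1 rad]))
        (((k : Nat) : Int), acc))
      = (((k / prodFact gs : Nat) : Int), acc ++ (codesAux gs k).reverse) := by
  induction gs generalizing acc with
  | nil => simp [prodFact, codesAux]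
  | cons g rest ih =>
      rw [List.map_cons, List.reverse_cons, List.foldl_append, ih acc]
      simp only [List.foldl_cons, List.foldl_nil, PySem.List.len_eq, factB_natCast,
        PySem.Int.floordiv_natCast, PySem.Int.mod_natCast]
      rw [codesAux, Prod.mk.injEq]
      refine ⟨?_, ?_⟩
      · congr 1
        rw [Nat.div_div_eq_div_mul]
        congr 1
        simp [prodFact, Nat.mul_comm]
      · simp [List.reverse_cons, List.append_assoc]

theorem ports_agree (seq : List String) :
    permute_AA_duplicates seq = permute_AA_duplicates_alt seq := by
  unfold permute_AA_duplicates permute_AA_duplicates_alt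
  simp only []
  rw [show ((buildGroups seq).map (fun g => factB (PySem.List.len g))).foldl (· * ·) 1
      = ((prodFact (buildGroups seq) : Nat) : Int) by rw [radices_foldl]; ring]
  simp only [PySem.List.pyRange_zero_natCast, List.foldl_map,
    PySem.List.foldl_append_singleton_eq_map, List.nil_append]
  cases hE : (buildGroups seq).isEmpty with
  | true =>
      rw [List.isEmpty_iff] at hE
      simp [hE, prodFact]
  | false =>
      simp only [Bool.false_eq_true, if_false]
      rw [← odometer_eq_pyProd]
      apply List.map_congr_left
      intro k hk
      congr 2
      rw [decode_foldl (buildGroups seq) k []]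
      simp

-- ===== VERDICT (by name: the statement is the Claim_ definition above) =====
theorem permute_AA_duplicates_spec : Claim_equal_permute_AA_duplicates := by
  intro seq _
  unfold Spec_permute_AA_duplicates
  exact ports_agree seq
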